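-- pv_equiv track=rewrite | github.com/ghostdev137/ford-pscm-re | tools/diff_block2_ag_ah.py | build_shift_map
-- ===== SOURCE A (Python) =====
-- CODE_END = 0x35000
--
-- def build_shift_map(ag, ah, code_end=CODE_END, block_size=8, search_range=600):
--     """
--     Build a shift map: for each position in AG, what's the offset to AH?
--     Uses block matching with a sliding window.
--     Returns array where shift_map[ag_off] = shift (ah_off = ag_off + shift).
--     """
--     shift_map = [None] * code_end
--
--     # First pass: find matching 8-byte blocks
--     # Build a hash map of AH blocks for fast lookup
--     ah_blocks = {}
--     for ah_pos in range(0, code_end, 2):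
--         if ah_pos + block_size <= len(ah):
--             key = ah[ah_pos:ah_pos + block_size]
--             if key not in ah_blocks:
--                 ah_blocks[key] = []
--             ah_blocks[key].append(ah_pos)
--
--     # For each AG position, find best matching AH block nearby
--     current_shift = 0
--     for ag_pos in range(0, code_end, 2):
--         if ag_pos + block_size > len(ag):
--             break
--
--         block = ag[ag_pos:ag_pos + block_size]
--
--         # First try current shift (fast path)
--         ah_pos = ag_pos + current_shift
--         if 0 <= ah_pos < code_end and ah_pos + block_size <= len(ah):
--             if ah[ah_pos:ah_pos + block_size] == block:
--                 for i in range(min(2, block_size)):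
--                     if ag_pos + i < code_end:
--                         shift_map[ag_pos + i] = current_shift
--                 continue
--
--         # Look up in hash map
--         candidates = ah_blocks.get(block, [])
--         best = None
--         best_dist = search_range + 1
--         for ah_cand in candidates:
--             dist = abs(ah_cand - (ag_pos + current_shift))
--             if dist < best_dist:
--                 best_dist = dist
--                 best = ah_cand
--
--         if best is not None and best_dist <= search_range:
--             new_shift = best - ag_pos
--             current_shift = new_shift
--             for i in range(min(2, block_size)):
--                 if ag_pos + i < code_end:
--                     shift_map[ag_pos + i] = new_shift
--
--     # Fill gaps by interpolation
--     last_known = None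
--     for i in range(code_end):
--         if shift_map[i] is not None:
--             last_known = shift_map[i]
--         elif last_known is not None:
--             shift_map[i] = last_known
--
--     return shift_map
-- ===== SOURCE B (Python) =====
-- # B: nearest candidate by bisect on the sorted candidate lists of a staged
-- # pair-list index, matches kept as a sparse event list merged into the output
-- # in one emission pass (no preallocated array mutation, no linear scan).
-- from bisect import bisect_left
--
-- CODE_END = 0x35000
--
-- def build_shift_map(ag, ah, code_end=CODE_END, block_size=8, search_range=600):
--     # index of AH blocks: stage the (position, block) pairs, then group them
--     pairs = [(p, ah[p:p + block_size]) for p in range(0, code_end, 2)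
--              if p + block_size <= len(ah)]
--     index = {}
--     for p, k in pairs:
--         index.setdefault(k, []).append(p)
--
--     def match_shift(pos, shift):
--         block = ag[pos:pos + block_size]
--         target = pos + shift
--         if (0 <= target < code_end and target + block_size <= len(ah)
--                 and ah[target:target + block_size] == block):
--             return shift
--         cands = index.get(block, [])
--         if not cands:
--             return None
--         # candidates ascend; nearest by binary search, ties to the smaller one
--         j = bisect_left(cands, target)
--         if j == len(cands):
--             best = cands[j - 1]
--         elif j == 0:
--             best = cands[0]
--         elif cands[j] - target < target - cands[j - 1]:
--             best = cands[j]
--         else: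
--             best = cands[j - 1]
--         if abs(best - target) <= search_range:
--             return best - pos
--         return None
--
--     events = []  # (position, shift), positions strictly ascending
--     shift = 0
--     for pos in range(0, code_end, 2):
--         if pos + block_size > len(ag):
--             break
--         s = match_shift(pos, shift)
--         if s is not None:
--             shift = s
--             for i in range(min(2, block_size)):
--                 if pos + i < code_end:
--                     events.append((pos + i, s))
--
--     out = []
--     last = None
--     j = 0
--     for i in range(code_end):
--         while j < len(events) and events[j][0] == i:
--             last = events[j][1]
--             j += 1
--         out.append(last)
--     return out
-- ===== Notes on version B (the rewrite author's own statement) =====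
-- stated objective: alternative
-- what changed: The per-block linear scan over all candidate positions is replaced by a bisect_left binary search on the sorted candidate lists of an index built by staging and grouping (position, block) pairs, the main loop records matches as a sparse (position, shift) event list instead of writing into a preallocated None array, and the output is produced by merging that event list with the position range in one emission pass instead of a mutate-then-interpolate pass.
import Mathlib
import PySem

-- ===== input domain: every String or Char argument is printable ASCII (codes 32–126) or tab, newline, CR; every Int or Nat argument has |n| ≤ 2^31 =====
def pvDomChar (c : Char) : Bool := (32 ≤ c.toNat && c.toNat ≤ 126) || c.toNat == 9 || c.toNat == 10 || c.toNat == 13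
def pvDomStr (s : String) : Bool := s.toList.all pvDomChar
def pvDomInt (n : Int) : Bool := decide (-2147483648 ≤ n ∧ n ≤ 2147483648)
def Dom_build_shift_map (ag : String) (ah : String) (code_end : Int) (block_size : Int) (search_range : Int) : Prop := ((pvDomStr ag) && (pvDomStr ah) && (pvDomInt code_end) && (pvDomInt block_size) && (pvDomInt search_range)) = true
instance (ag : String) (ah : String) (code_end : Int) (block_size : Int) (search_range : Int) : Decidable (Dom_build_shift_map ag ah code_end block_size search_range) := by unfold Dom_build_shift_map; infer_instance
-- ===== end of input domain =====

-- B replaces A's per-block linear candidate scan by a bisect_left binary search on the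
-- sorted candidate lists of an index built by grouping staged pairs, records matches as a
-- sparse event list, and emits the output by merging events with the range in one pass.

-- ===== PORT A =====

/-- A: the two writes `shift_map[ag_pos+i] = v` guarded by `ag_pos+i < code_end`. -/
def pvWriteA (code_end block_size : Int) (v : Int) (ag_pos : Int)
    (sm : List (Option Int)) : List (Option Int) :=
  (PySem.List.pyRange 0 (min 2 block_size) 1).foldl
    (fun sm i => if ag_pos + i < code_end then PySem.List.pySetD sm (ag_pos + i) (some v) else sm)
    sm

/-- A: building `ah_blocks` (`if key not in …: … = []` then `append`). -/
def pvBlocksA (ah : String) (code_end block_size : Int) : PySem.Dict String (List Int) :=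
  (PySem.List.pyRange 0 code_end 2).foldl
    (fun d ah_pos =>
      if ah_pos + block_size ≤ PySem.Str.len ah then
        let key := PySem.Str.slice ah (some ah_pos) (some (ah_pos + block_size))
        let d := if d.contains key then d else d.insert key []
        d.modify key [] (fun l => l ++ [ah_pos])
      else d)
    PySem.Dict.empty

/-- A: the linear scan `for ah_cand in candidates: …` keeping (best, best_dist). -/
def pvScanA (t : Int) (st : Option Int × Int) (c : Int) : Option Int × Int :=
  if |c - t| < st.2 then (some c, |c - t|) else st

/-- A: one iteration of the main `for ag_pos in range(0, code_end, 2)` loop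
    (state: shift_map, current_shift, broke-flag for the `break`). -/
def pvStepA (ag ah : String) (code_end block_size search_range : Int)
    (blocks : PySem.Dict String (List Int))
    (st : List (Option Int) × Int × Bool) (ag_pos : Int) : List (Option Int) × Int × Bool :=
  if st.2.2 then st
  else if PySem.Str.len ag < ag_pos + block_size then (st.1, st.2.1, true)
  else
    let block := PySem.Str.slice ag (some ag_pos) (some (ag_pos + block_size))
    let ah_pos := ag_pos + st.2.1
    if 0 ≤ ah_pos ∧ ah_pos < code_end ∧ ah_pos + block_size ≤ PySem.Str.len ah ∧
        PySem.Str.slice ah (some ah_pos) (some (ah_pos + block_size)) = block then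
      (pvWriteA code_end block_size st.2.1 ag_pos st.1, st.2.1, false)
    else
      let candidates := blocks.getD block []
      let scan := candidates.foldl (pvScanA ah_pos) (none, search_range + 1)
      match scan.1 with
      | some best =>
          if scan.2 ≤ search_range then
            (pvWriteA code_end block_size (best - ag_pos) ag_pos st.1, best - ag_pos, false)
          else st
      | none => st

/-- A: the gap-filling interpolation pass (mutating `shift_map`, tracking `last_known`). -/
def pvInterpA (code_end : Int) (sm : List (Option Int)) : List (Option Int) :=
  ((PySem.List.pyRange 0 code_end 1).foldl
    (fun (st : List (Option Int) × Option Int) i =>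
      match PySem.List.pyGetD st.1 i none with
      | some v => (st.1, some v)
      | none =>
        match st.2 with
        | some lv => (PySem.List.pySetD st.1 i (some lv), some lv)
        | none => st)
    (sm, none)).1

def build_shift_map (ag : String) (ah : String) (code_end : Int) (block_size : Int) (search_range : Int) : List (Option Int) :=
  let shift_map : List (Option Int) := List.replicate code_end.toNat none
  let blocks := pvBlocksA ah code_end block_size
  let fin := (PySem.List.pyRange 0 code_end 2).foldl
    (pvStepA ag ah code_end block_size search_range blocks) (shift_map, 0, false)
  pvInterpA code_end fin.1

-- ===== PORT B =====

/-- B: the staged `(position, block)` pair list of the index comprehension. -/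
def pvPairsB (ah : String) (code_end block_size : Int) : List (Int × String) :=
  ((PySem.List.pyRange 0 code_end 2).filter
    (fun p => decide (p + block_size ≤ PySem.Str.len ah))).map
    (fun p => (p, PySem.Str.slice ah (some p) (some (p + block_size))))

/-- B: grouping the staged pairs with `index.setdefault(k, []).append(p)`. -/
def pvIndexB (ah : String) (code_end block_size : Int) : PySem.Dict String (List Int) :=
  (pvPairsB ah code_end block_size).foldl
    (fun d pk => d.insert pk.2 (d.getD pk.2 [] ++ [pk.1])) PySem.Dict.empty

/-- B: `match_shift` — fast path at the current shift, else the nearest candidate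
    found by `bisect_left` on the ascending candidate list. -/
def pvMatchB (ag ah : String) (code_end block_size search_range : Int)
    (idx : PySem.Dict String (List Int)) (pos shift : Int) : Option Int :=
  let block := PySem.Str.slice ag (some pos) (some (pos + block_size))
  let target := pos + shift
  if 0 ≤ target ∧ target < code_end ∧ target + block_size ≤ PySem.Str.len ah ∧
      PySem.Str.slice ah (some target) (some (target + block_size)) = block then
    some shift
  else
    let cands := idx.getD block []
    if cands = [] then none
    else
      let j := PySem.List.bisectLeft cands target
      let best :=
        if j = cands.length then cands.getD (j - 1) 0
        else if j = 0 then cands.getD 0 0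
        else if cands.getD j 0 - target < target - cands.getD (j - 1) 0 then cands.getD j 0
        else cands.getD (j - 1) 0
      if |best - target| ≤ search_range then some (best - pos) else none

/-- B: the `events.append((pos + i, s))` loop for one matched position. -/
def pvEventsB (code_end block_size pos s : Int) : List (Int × Int) :=
  (PySem.List.pyRange 0 (min 2 block_size) 1).foldl
    (fun ev i => if pos + i < code_end then ev ++ [(pos + i, s)] else ev) []

/-- B: the main loop as structural recursion over the position list (`break` = stop). -/
def pvLoopB (ag ah : String) (code_end block_size search_range : Int)
    (idx : PySem.Dict String (List Int)) : List Int → Int → List (Int × Int)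
  | [], _ => []
  | pos :: rest, shift =>
    if PySem.Str.len ag < pos + block_size then []
    else
      match pvMatchB ag ah code_end block_size search_range idx pos shift with
      | some s => pvEventsB code_end block_size pos s
          ++ pvLoopB ag ah code_end block_size search_range idx rest s
      | none => pvLoopB ag ah code_end block_size search_range idx rest shift

/-- B: the inner `while` consuming the events whose position equals `i`. -/
def pvConsumeB (i : Int) : List (Int × Int) → Option Int → Option Int × List (Int × Int)
  | [], last => (last, [])
  | (p, s) :: t, last => if p = i then pvConsumeB i t (some s) else (last, (p, s) :: t)

/-- B: the emission pass merging the event list into the output. -/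
def pvEmitB (code_end : Int) (events : List (Int × Int)) : List (Option Int) :=
  ((PySem.List.pyRange 0 code_end 1).foldl
    (fun (st : List (Option Int) × Option Int × List (Int × Int)) i =>
      let c := pvConsumeB i st.2.2 st.2.1
      (st.1 ++ [c.1], c.1, c.2))
    ([], none, events)).1

def build_shift_map_alt (ag : String) (ah : String) (code_end : Int) (block_size : Int) (search_range : Int) : List (Option Int) :=
  let idx := pvIndexB ah code_end block_size
  pvEmitB code_end
    (pvLoopB ag ah code_end block_size search_range idx (PySem.List.pyRange 0 code_end 2) 0)

-- ===== PRECONDITION & SPEC =====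
def Spec_build_shift_map (ag : String) (ah : String) (code_end : Int) (block_size : Int) (search_range : Int) (out : List (Option Int)) : Prop := out = build_shift_map_alt ag ah code_end block_size search_range
instance (ag : String) (ah : String) (code_end : Int) (block_size : Int) (search_range : Int) (out : List (Option Int)) : Decidable (Spec_build_shift_map ag ah code_end block_size search_range out) := by unfold Spec_build_shift_map; infer_instance

-- ===== CLAIM (what is proved, stated in full; the proofs are below) =====
def Claim_equal_build_shift_map : Prop := ∀ (ag : String) (ah : String) (code_end : Int) (block_size : Int) (search_range : Int), Dom_build_shift_map ag ah code_end block_size search_range → Spec_build_shift_map ag ah code_end block_size search_range (build_shift_map ag ah code_end block_size search_range)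

-- ===== LEMMAS AND PROOFS =====

/-- The candidate list both index builds produce for a key: the matching even positions. -/
def pvCand (ah : String) (code_end block_size : Int) (k : String) : List Int :=
  (PySem.List.pyRange 0 code_end 2).filter
    (fun p => decide (p + block_size ≤ PySem.Str.len ah ∧
      PySem.Str.slice ah (some p) (some (p + block_size)) = k))

theorem pvFoldlRel {α β γ : Type} (R : α → β → Prop) (f : α → γ → α) (g : β → γ → β)
    (l : List γ) (h : ∀ a b c, c ∈ l → R a b → R (f a c) (g b c)) :
    ∀ {a0 : α} {b0 : β}, R a0 b0 → R (l.foldl f a0) (l.foldl g b0) := by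
  induction l with
  | nil => intro a0 b0 h0; exact h0
  | cons c t ih =>
    intro a0 b0 h0
    exact ih (fun a b x hx => h a b x (List.mem_cons_of_mem _ hx)) (h a0 b0 c List.mem_cons_self h0)

theorem pvStepBlocks_getD (d : PySem.Dict String (List Int)) (key k : String) (q : Int) :
    ((if d.contains key then d else d.insert key []).modify key [] (fun l => l ++ [q])).getD k []
      = if k = key then d.getD k [] ++ [q] else d.getD k [] := by
  by_cases hk : k = key
  · subst hk
    rw [if_pos rfl, PySem.Dict.getD_modify_self]
    congr 1
    by_cases hcont : d.contains k
    · rw [if_pos hcont]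
    · rw [if_neg hcont, PySem.Dict.getD_insert_self]
      have hg : d.get? k = none := (PySem.Dict.get?_eq_none_iff_contains d k).2 (by
        simpa using hcont)
      rw [show d.getD k [] = (d.get? k).getD [] from rfl, hg]
      rfl
  · rw [if_neg hk, PySem.Dict.getD_modify_of_ne _ _ _ hk]
    by_cases hcont : d.contains key
    · rw [if_pos hcont]
    · rw [if_neg hcont, PySem.Dict.getD_insert_of_ne _ _ _ hk]

/-- Characterisation of A's hash-map build: per-key list = filtered position list. -/
theorem pvBlocksA_getD (ah : String) (block_size : Int) (k : String) :
    ∀ (l : List Int) (d : PySem.Dict String (List Int)),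
    (l.foldl (fun d ah_pos =>
      if ah_pos + block_size ≤ PySem.Str.len ah then
        let key := PySem.Str.slice ah (some ah_pos) (some (ah_pos + block_size))
        let d := if d.contains key then d else d.insert key []
        d.modify key [] (fun l => l ++ [ah_pos])
      else d) d).getD k []
    = d.getD k [] ++ l.filter (fun p => decide (p + block_size ≤ PySem.Str.len ah ∧
        PySem.Str.slice ah (some p) (some (p + block_size)) = k)) := by
  intro l
  induction l with
  | nil => intro d; simp
  | cons q rest ih =>
    intro d
    rw [List.foldl_cons, ih, List.filter_cons]
    by_cases hg : q + block_size ≤ PySem.Str.len ah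
    · rw [if_pos hg]
      show ((if d.contains _ then d else d.insert _ []).modify _ [] (fun l => l ++ [q])).getD k []
          ++ _ = _
      rw [pvStepBlocks_getD]
      by_cases hk : k = PySem.Str.slice ah (some q) (some (q + block_size))
      · rw [if_pos hk]
        have : (decide (q + block_size ≤ PySem.Str.len ah ∧
            PySem.Str.slice ah (some q) (some (q + block_size)) = k)) = true := by
          simp only [decide_eq_true_eq]; exact ⟨hg, hk.symm⟩
        rw [this]
        simp
      · rw [if_neg hk]
        have : (decide (q + block_size ≤ PySem.Str.len ah ∧
            PySem.Str.slice ah (some q) (some (q + block_size)) = k)) = false := by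
          simp only [decide_eq_false_iff_not]; rintro ⟨-, h⟩; exact hk h.symm
        rw [this]
        simp
    · rw [if_neg hg]
      have : (decide (q + block_size ≤ PySem.Str.len ah ∧
          PySem.Str.slice ah (some q) (some (q + block_size)) = k)) = false := by
        simp only [decide_eq_false_iff_not]; rintro ⟨h, -⟩; exact hg h
      rw [this]
      simp

theorem pvBlocksA_cand (ah : String) (code_end block_size : Int) (k : String) :
    (pvBlocksA ah code_end block_size).getD k [] = pvCand ah code_end block_size k := by
  unfold pvBlocksA pvCand
  rw [pvBlocksA_getD]
  show (PySem.Dict.empty.get? k).getD [] ++ _ = _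
  rw [PySem.Dict.get?_empty]
  simp

/-- Characterisation of B's grouping fold: per-key list = the matching staged positions. -/
theorem pvIndexFold_getD (k : String) :
    ∀ (ps : List (Int × String)) (d : PySem.Dict String (List Int)),
    (ps.foldl (fun d pk => d.insert pk.2 (d.getD pk.2 [] ++ [pk.1])) d).getD k []
      = d.getD k [] ++ (ps.filter (fun pk => decide (pk.2 = k))).map (·.1) := by
  intro ps
  induction ps with
  | nil => intro d; simp
  | cons pk rest ih =>
    intro d
    rw [List.foldl_cons, ih, List.filter_cons]
    by_cases hk : pk.2 = k
    · rw [show (decide (pk.2 = k)) = true by simp [hk]]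
      subst hk
      rw [PySem.Dict.getD_insert_self]
      simp
    · rw [show (decide (pk.2 = k)) = false by simp [hk]]
      rw [PySem.Dict.getD_insert_of_ne _ _ _ (fun h => hk h.symm)]
      simp

theorem pvIndexB_cand (ah : String) (code_end block_size : Int) (k : String) :
    (pvIndexB ah code_end block_size).getD k [] = pvCand ah code_end block_size k := by
  unfold pvIndexB pvPairsB pvCand
  rw [pvIndexFold_getD]
  rw [show (PySem.Dict.empty : PySem.Dict String (List Int)).getD k [] = [] from by
    show (PySem.Dict.empty.get? k).getD [] = []
    rw [PySem.Dict.get?_empty]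
    rfl]
  rw [List.nil_append, List.filter_map, List.map_map]
  rw [List.filter_filter]
  rw [show ((fun pk : Int × String => decide (pk.2 = k)) ∘
      (fun p : Int => (p, PySem.Str.slice ah (some p) (some (p + block_size)))))
    = (fun p : Int => decide (PySem.Str.slice ah (some p) (some (p + block_size)) = k))
    from rfl]
  rw [show ((fun pk : Int × String => pk.1) ∘
      (fun p : Int => (p, PySem.Str.slice ah (some p) (some (p + block_size)))))
    = id from rfl, List.map_id]
  apply List.filter_congr
  intro p _
  rw [Bool.and_comm, ← Bool.decide_and]

/-- The even-position range is spaced by 2. -/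
theorem pvRange2_spaced (code_end : Int) :
    (PySem.List.pyRange 0 code_end 2).Pairwise (fun a b => a + 2 ≤ b) := by
  rw [PySem.List.pyRange_of_pos 0 code_end (by omega)]
  rw [List.pairwise_map]
  exact (List.pairwise_lt_range).imp (by intro i j hij; omega)

theorem pvCand_sorted (ah : String) (code_end block_size : Int) (k : String) :
    (pvCand ah code_end block_size k).Pairwise (· < ·) := by
  unfold pvCand
  exact ((pvRange2_spaced code_end).imp (by intro a b h; omega)).sublist
    List.filter_sublist

-- ===== the linear nearest scan vs the bisect pick =====

theorem pvScan_decreasing (t : Int) : ∀ (P : List Int) (st0 : Option Int × Int),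
    P.Pairwise (· < ·) → (∀ x ∈ P, x < t) →
    P.foldl (pvScanA t) st0 =
      (match P.getLast? with
       | none => st0
       | some lst => if t - lst < st0.2 then (some lst, t - lst) else st0) := by
  intro P
  induction P with
  | nil => intro st0 _ _; simp
  | cons x P' ih =>
    intro st0 hp hlt
    have hx : x < t := hlt x List.mem_cons_self
    have habs : |x - t| = t - x := by rw [abs_sub_comm]; exact abs_of_pos (by omega)
    have hstep : pvScanA t st0 x = if t - x < st0.2 then (some x, t - x) else st0 := by
      simp [pvScanA, habs]
    rw [List.foldl_cons, hstep,
      ih _ (List.Pairwise.of_cons hp) (fun y hy => hlt y (List.mem_cons_of_mem _ hy))]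
    cases P' with
    | nil =>
      simp only [List.getLast?_nil, List.getLast?_singleton]
    | cons y P'' =>
      have hne : (y :: P'') ≠ ([] : List Int) := by simp
      have hlast : (y :: P'').getLast? = some ((y :: P'').getLast hne) :=
        List.getLast?_eq_some_getLast hne
      have hxl : x < (y :: P'').getLast hne :=
        (List.pairwise_cons.1 hp).1 _ (List.getLast_mem hne)
      rw [List.getLast?_cons_cons, hlast]
      by_cases h0 : t - x < st0.2
      · rw [if_pos h0]
        show (if t - (y :: P'').getLast hne < t - x then
            ((some ((y :: P'').getLast hne) : Option Int), t - (y :: P'').getLast hne)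
          else ((some x : Option Int), t - x)) = _
        rw [if_pos (by omega)]
        show _ = if t - (y :: P'').getLast hne < st0.2 then
            ((some ((y :: P'').getLast hne) : Option Int), t - (y :: P'').getLast hne) else st0
        rw [if_pos (by omega)]
      · rw [if_neg h0]

theorem pvScan_increasing (t : Int) : ∀ (S : List Int) (st0 : Option Int × Int),
    S.Pairwise (· < ·) → (∀ x ∈ S, t ≤ x) →
    S.foldl (pvScanA t) st0 =
      (match S.head? with
       | none => st0
       | some hd => if hd - t < st0.2 then (some hd, hd - t) else st0) := by
  intro S
  induction S with
  | nil => intro st0 _ _; simp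
  | cons y S' ih =>
    intro st0 hp hge
    have hy : t ≤ y := hge y List.mem_cons_self
    have habs : |y - t| = y - t := abs_of_nonneg (by omega)
    have hstep : pvScanA t st0 y = if y - t < st0.2 then (some y, y - t) else st0 := by
      simp [pvScanA, habs]
    rw [List.foldl_cons, hstep,
      ih _ (List.Pairwise.of_cons hp) (fun z hz => hge z (List.mem_cons_of_mem _ hz))]
    cases S' with
    | nil => simp
    | cons z S'' =>
      have hz : y < z := (List.pairwise_cons.1 hp).1 z List.mem_cons_self
      simp only [List.head?_cons]
      by_cases h0 : y - t < st0.2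
      · rw [if_pos h0]
        rw [if_neg (show ¬ z - t < ((some y : Option Int), y - t).2 by simp; omega)]
      · rw [if_neg h0]
        rw [if_neg (show ¬ z - t < st0.2 by omega)]

/-- The bisect pick of B, as a named helper (definitionally B's inline code). -/
def pvPick (cands : List Int) (t : Int) : Int :=
  let k := PySem.List.bisectLeft cands t
  if k = cands.length then cands.getD (k - 1) 0
  else if k = 0 then cands.getD 0 0
  else if cands.getD k 0 - t < t - cands.getD (k - 1) 0 then cands.getD k 0
  else cands.getD (k - 1) 0

/-- A's scan-then-threshold decision, as a named option. -/
def pvSelOpt (cands : List Int) (t R : Int) : Option Int :=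
  match (cands.foldl (pvScanA t) (none, R + 1)).1 with
  | some b => if (cands.foldl (pvScanA t) (none, R + 1)).2 ≤ R then some b else none
  | none => none

theorem pvBisect_eq (cands : List Int) (t : Int) (hp : cands.Pairwise (· < ·)) :
    PySem.List.bisectLeft cands t = (cands.takeWhile (fun x => decide (x < t))).length := by
  obtain ⟨hkle, hlt, hge⟩ := PySem.List.bisectLeft_spec cands t (hp.imp le_of_lt)
  set p : Int → Bool := fun x => decide (x < t) with hpdef
  set k := PySem.List.bisectLeft cands t with hkdef
  set m := (cands.takeWhile p).length with hmdef
  have hmle : m ≤ cands.length := List.Sublist.length_le (List.takeWhile_sublist p)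
  have hmem : ∀ j (hj : j < m), cands[j]'(by omega) < t := by
    intro j hj
    have h3 := List.mem_takeWhile_imp (List.getElem_mem (l := cands.takeWhile p) (by omega))
    rw [(List.takeWhile_prefix p).getElem] at h3
    simpa [hpdef] using h3
  rcases lt_trichotomy k m with h | h | h
  · exact absurd (hmem k (by omega)) (by have := hge k (by omega) le_rfl; omega)
  · exact h
  · have hmlen : m < cands.length := by omega
    have h1 : cands[m]'(hmlen) < t := hlt m hmlen h
    have hc : cands.takeWhile p ++ cands.dropWhile p = cands := List.takeWhile_append_dropWhile
    have hSne : cands.dropWhile p ≠ [] := by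
      intro hS
      rw [hS, List.append_nil] at hc
      have : cands.length = m := by rw [← hc, hmdef]
      omega
    have hhead : cands[m]'(hmlen) = (cands.dropWhile p).head hSne := by
      have h4 : (cands.takeWhile p ++ cands.dropWhile p)[m]'(by rw [hc]; omega)
          = cands[m]'(hmlen) := by simp [hc]
      rw [← h4, List.getElem_append_right (by omega)]
      simp [← hmdef, List.getElem_zero_eq_head]
    have h5 := List.head_dropWhile_not p hSne
    rw [← hhead] at h5
    simp [hpdef] at h5
    omega

/-- Core: first-wins linear nearest scan = bisect pick, over the split P ++ S. -/
theorem pvSelect_core (P S : List Int) (t R : Int)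
    (hPt : ∀ x ∈ P, x < t) (hSt : ∀ x ∈ S, t ≤ x)
    (hPp : P.Pairwise (· < ·)) (hSp : S.Pairwise (· < ·))
    (hk : PySem.List.bisectLeft (P ++ S) t = P.length)
    (hne : P ++ S ≠ []) :
    pvSelOpt (P ++ S) t R
    = (if |pvPick (P ++ S) t - t| ≤ R then some (pvPick (P ++ S) t) else none) := by
  unfold pvSelOpt
  simp only [List.foldl_append]
  cases S with
  | nil =>
    cases P with
    | nil => simp at hne
    | cons a P' =>
      have hne' : (a :: P') ≠ ([] : List Int) := by simp
      have hlast : (a :: P').getLast? = some ((a :: P').getLast hne') :=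
        List.getLast?_eq_some_getLast hne'
      set lst := (a :: P').getLast hne' with hlstdef
      have hlt : lst < t := hPt _ (List.getLast_mem hne')
      have habs : |lst - t| = t - lst := by rw [abs_sub_comm]; exact abs_of_pos (by omega)
      have hgd : ((a :: P') ++ ([] : List Int)).getD ((a :: P').length - 1) 0 = lst := by
        rw [List.append_nil, List.getD_eq_getElem _ 0 (by simp), hlstdef,
          List.getLast_eq_getElem]
        rfl
      have hpick : pvPick ((a :: P') ++ []) t = lst := by
        simp only [pvPick, hk]
        rw [if_pos (by simp), hgd]
      rw [hpick, habs, List.foldl_nil]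
      by_cases h1 : t - lst < R + 1
      · have hst1 : (a :: P').foldl (pvScanA t) (none, R + 1) = (some lst, t - lst) := by
          rw [pvScan_decreasing t _ _ hPp hPt, hlast]
          show (if t - lst < R + 1 then ((some lst : Option Int), t - lst)
              else ((none : Option Int), R + 1)) = _
          rw [if_pos h1]
        rw [hst1]
      · have hst1 : (a :: P').foldl (pvScanA t) (none, R + 1) = (none, R + 1) := by
          rw [pvScan_decreasing t _ _ hPp hPt, hlast]
          show (if t - lst < R + 1 then ((some lst : Option Int), t - lst)
              else ((none : Option Int), R + 1)) = _
          rw [if_neg h1]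
        rw [hst1, if_neg (by omega)]
  | cons b S' =>
    have hbt : t ≤ b := hSt _ List.mem_cons_self
    have habsb : |b - t| = b - t := abs_of_nonneg (by omega)
    have hlb : (P ++ b :: S').length = P.length + S'.length + 1 := by simp; omega
    have hgdb : (P ++ b :: S').getD P.length 0 = b := by
      rw [List.getD_eq_getElem _ 0 (by omega), List.getElem_append_right (le_refl P.length)]
      simp
    cases P with
    | nil =>
      have hpick : pvPick (([] : List Int) ++ b :: S') t = b := by
        simp only [pvPick, hk]
        rw [if_neg (by omega), if_pos (show List.length ([] : List Int) = 0 from rfl)]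
        exact hgdb
      rw [hpick, habsb, List.foldl_nil]
      by_cases h1 : b - t < R + 1
      · have hst2 : (b :: S').foldl (pvScanA t) (none, R + 1) = (some b, b - t) := by
          rw [pvScan_increasing t _ _ hSp hSt, List.head?_cons]
          show (if b - t < R + 1 then ((some b : Option Int), b - t)
              else ((none : Option Int), R + 1)) = _
          rw [if_pos h1]
        rw [hst2]
      · have hst2 : (b :: S').foldl (pvScanA t) (none, R + 1) = (none, R + 1) := by
          rw [pvScan_increasing t _ _ hSp hSt, List.head?_cons]
          show (if b - t < R + 1 then ((some b : Option Int), b - t)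
              else ((none : Option Int), R + 1)) = _
          rw [if_neg h1]
        rw [hst2, if_neg (by omega)]
    | cons a P' =>
      have hne' : (a :: P') ≠ ([] : List Int) := by simp
      have hlast : (a :: P').getLast? = some ((a :: P').getLast hne') :=
        List.getLast?_eq_some_getLast hne'
      set lst := (a :: P').getLast hne' with hlstdef
      have hlt : lst < t := hPt _ (List.getLast_mem hne')
      have habs : |lst - t| = t - lst := by rw [abs_sub_comm]; exact abs_of_pos (by omega)
      have hgd : ((a :: P') ++ b :: S').getD ((a :: P').length - 1) 0 = lst := by
        rw [List.getD_eq_getElem _ 0 (by simp), List.getElem_append_left (by simp),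
          hlstdef, List.getLast_eq_getElem]
        rfl
      have hpick : pvPick ((a :: P') ++ b :: S') t
          = if b - t < t - lst then b else lst := by
        simp only [pvPick, hk]
        rw [if_neg (by omega), if_neg (by simp), hgd, hgdb]
      by_cases h1 : t - lst < R + 1
      · have hst1 : (a :: P').foldl (pvScanA t) (none, R + 1) = (some lst, t - lst) := by
          rw [pvScan_decreasing t _ _ hPp hPt, hlast]
          show (if t - lst < R + 1 then ((some lst : Option Int), t - lst)
              else ((none : Option Int), R + 1)) = _
          rw [if_pos h1]
        rw [hst1]
        by_cases h2 : b - t < t - lst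
        · have hst2 : (b :: S').foldl (pvScanA t) (some lst, t - lst) = (some b, b - t) := by
            rw [pvScan_increasing t _ _ hSp hSt, List.head?_cons]
            show (if b - t < t - lst then ((some b : Option Int), b - t)
                else ((some lst : Option Int), t - lst)) = _
            rw [if_pos h2]
          have hpv : pvPick ((a :: P') ++ b :: S') t = b := by rw [hpick, if_pos h2]
          rw [hst2, hpv, habsb]
        · have hst2 : (b :: S').foldl (pvScanA t) (some lst, t - lst) = (some lst, t - lst) := by
            rw [pvScan_increasing t _ _ hSp hSt, List.head?_cons]
            show (if b - t < t - lst then ((some b : Option Int), b - t)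
                else ((some lst : Option Int), t - lst)) = _
            rw [if_neg h2]
          have hpv : pvPick ((a :: P') ++ b :: S') t = lst := by rw [hpick, if_neg h2]
          rw [hst2, hpv, habs]
      · have hst1 : (a :: P').foldl (pvScanA t) (none, R + 1) = (none, R + 1) := by
          rw [pvScan_decreasing t _ _ hPp hPt, hlast]
          show (if t - lst < R + 1 then ((some lst : Option Int), t - lst)
              else ((none : Option Int), R + 1)) = _
          rw [if_neg h1]
        rw [hst1]
        by_cases h2 : b - t < R + 1
        · have hst2 : (b :: S').foldl (pvScanA t) (none, R + 1) = (some b, b - t) := by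
            rw [pvScan_increasing t _ _ hSp hSt, List.head?_cons]
            show (if b - t < R + 1 then ((some b : Option Int), b - t)
                else ((none : Option Int), R + 1)) = _
            rw [if_pos h2]
          have hpv : pvPick ((a :: P') ++ b :: S') t = b := by rw [hpick, if_pos (by omega)]
          rw [hst2, hpv, habsb]
        · have hst2 : (b :: S').foldl (pvScanA t) (none, R + 1) = (none, R + 1) := by
            rw [pvScan_increasing t _ _ hSp hSt, List.head?_cons]
            show (if b - t < R + 1 then ((some b : Option Int), b - t)
                else ((none : Option Int), R + 1)) = _
            rw [if_neg h2]
          rw [hst2]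
          by_cases h3 : b - t < t - lst
          · have hpv : pvPick ((a :: P') ++ b :: S') t = b := by rw [hpick, if_pos h3]
            rw [hpv, habsb, if_neg (by omega)]
          · have hpv : pvPick ((a :: P') ++ b :: S') t = lst := by rw [hpick, if_neg h3]
            rw [hpv, habs, if_neg (by omega)]

theorem pvSorted_head_le (S : List Int) (t : Int) (hSp : S.Pairwise (· < ·)) (hne : S ≠ [])
    (hh : t ≤ S.head hne) : ∀ x ∈ S, t ≤ x := by
  cases S with
  | nil => simp
  | cons b S' =>
    intro x hx
    rcases List.mem_cons.1 hx with rfl | hx'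
    · exact hh
    · have h1 := (List.pairwise_cons.1 hSp).1 x hx'
      have h2 : t ≤ b := hh
      omega

/-- The linear first-wins nearest scan equals the bisect pick, on a strictly
    ascending candidate list. -/
theorem pvSelect_eq (cands : List Int) (t R : Int) (hp : cands.Pairwise (· < ·)) :
    pvSelOpt cands t R
    = (if cands = [] then none
       else if |pvPick cands t - t| ≤ R then some (pvPick cands t) else none) := by
  by_cases hnil : cands = []
  · subst hnil; simp [pvSelOpt]
  · rw [if_neg hnil]
    have hc : cands = cands.takeWhile (fun x => decide (x < t))
        ++ cands.dropWhile (fun x => decide (x < t)) :=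
      (List.takeWhile_append_dropWhile).symm
    have hPt : ∀ x ∈ cands.takeWhile (fun x => decide (x < t)), x < t := by
      intro x hx
      simpa using List.mem_takeWhile_imp hx
    have hPp : (cands.takeWhile (fun x => decide (x < t))).Pairwise (· < ·) :=
      hp.sublist (List.takeWhile_sublist _)
    have hSp : (cands.dropWhile (fun x => decide (x < t))).Pairwise (· < ·) :=
      hp.sublist (List.dropWhile_sublist _)
    have hSt : ∀ x ∈ cands.dropWhile (fun x => decide (x < t)), t ≤ x := by
      intro x hx
      have hSne : cands.dropWhile (fun x => decide (x < t)) ≠ [] := List.ne_nil_of_mem hx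
      refine pvSorted_head_le _ t hSp hSne ?_ x hx
      have := List.head_dropWhile_not (fun x => decide (x < t)) hSne
      simpa using this
    have hk : PySem.List.bisectLeft
        (cands.takeWhile (fun x => decide (x < t)) ++ cands.dropWhile (fun x => decide (x < t))) t
        = (cands.takeWhile (fun x => decide (x < t))).length := by
      rw [← hc]; exact pvBisect_eq cands t hp
    have hne : cands.takeWhile (fun x => decide (x < t))
        ++ cands.dropWhile (fun x => decide (x < t)) ≠ [] := by rw [← hc]; exact hnil
    rw [hc]
    exact pvSelect_core _ _ t R hPt hSt hPp hSp hk hne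

-- ===== the event list vs A's array writes =====

/-- Applying an event list to a shift-map array (last write wins). -/
def pvApplyEv (sm : List (Option Int)) (E : List (Int × Int)) : List (Option Int) :=
  E.foldl (fun sm e => PySem.List.pySetD sm e.1 (some e.2)) sm

theorem pvApplyEv_append (sm : List (Option Int)) (E F : List (Int × Int)) :
    pvApplyEv sm (E ++ F) = pvApplyEv (pvApplyEv sm E) F := by
  unfold pvApplyEv; rw [List.foldl_append]

theorem pvWrite_apply (code_end block_size v ag_pos : Int) (sm : List (Option Int)) :
    pvWriteA code_end block_size v ag_pos sm
      = pvApplyEv sm (pvEventsB code_end block_size ag_pos v) := by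
  unfold pvWriteA pvEventsB
  refine pvFoldlRel (fun a b => a = pvApplyEv sm b) _ _ _ (fun a b i _ hrel => ?_) rfl
  subst hrel
  by_cases hlt : ag_pos + i < code_end
  · rw [if_pos hlt, if_pos hlt, pvApplyEv_append]
    rfl
  · rw [if_neg hlt, if_neg hlt]

/-- First-match lookup in an event list. -/
def pvLookup : List (Int × Int) → Int → Option Int
  | [], _ => none
  | e :: t, i => if e.1 = i then some e.2 else pvLookup t i

theorem pvLookup_none_of_lt (i : Int) :
    ∀ (E : List (Int × Int)), (∀ e ∈ E, i < e.1) → pvLookup E i = none := by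
  intro E
  induction E with
  | nil => intro _; rfl
  | cons e t ih =>
    intro h
    have := h e List.mem_cons_self
    rw [pvLookup, if_neg (by omega)]
    exact ih (fun x hx => h x (List.mem_cons_of_mem _ hx))

theorem pvApplyEv_length (E : List (Int × Int)) :
    ∀ (sm : List (Option Int)), (pvApplyEv sm E).length = sm.length := by
  induction E with
  | nil => intro sm; rfl
  | cons e t ih =>
    intro sm
    show (pvApplyEv (PySem.List.pySetD sm e.1 (some e.2)) t).length = _
    rw [ih, PySem.List.length_pySetD]

theorem pvApplyEv_getElem (E : List (Int × Int)) :
    ∀ (sm : List (Option Int)) (i : Nat) (hi : i < sm.length),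
    E.Pairwise (fun a b => a.1 < b.1) → (∀ e ∈ E, 0 ≤ e.1) →
    (pvApplyEv sm E)[i]'(by rw [pvApplyEv_length]; omega)
      = (match pvLookup E (i : Int) with
         | some s => some s
         | none => sm[i]) := by
  induction E with
  | nil => intro sm i hi _ _; rfl
  | cons e t ih =>
    intro sm i hi hp h0
    have he0 : 0 ≤ e.1 := h0 e List.mem_cons_self
    have htp := (List.pairwise_cons.1 hp).1
    have hrec := ih (PySem.List.pySetD sm e.1 (some e.2)) i
      (by rw [PySem.List.length_pySetD]; omega)
      (List.Pairwise.of_cons hp) (fun x hx => h0 x (List.mem_cons_of_mem _ hx))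
    refine Eq.trans hrec ?_
    simp only [PySem.List.pySetD_of_nonneg _ _ he0]
    cases hl : pvLookup t (i : Int) with
    | some s =>
      have hne : e.1 ≠ (i : Int) := by
        intro hcontr
        have : pvLookup t (i : Int) = none := by
          apply pvLookup_none_of_lt
          intro x hx
          have := htp x hx
          omega
        rw [hl] at this
        cases this
      rw [show pvLookup (e :: t) (i : Int) = pvLookup t (i : Int) from by
        rw [pvLookup, if_neg hne], hl]
    | none =>
      by_cases hei : e.1 = (i : Int)
      · rw [show pvLookup (e :: t) (i : Int) = some e.2 from by rw [pvLookup, if_pos hei]]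
        show (sm.set e.1.toNat (some e.2))[i]'_ = some e.2
        rw [List.getElem_set, if_pos (by omega)]
      · rw [show pvLookup (e :: t) (i : Int) = pvLookup t (i : Int) from by
          rw [pvLookup, if_neg hei], hl]
        show (sm.set e.1.toNat (some e.2))[i]'_ = sm[i]
        rw [List.getElem_set, if_neg (by omega)]

/-- The sparse view of an event list over `n` positions starting at `a`. -/
def pvSparse (E : List (Int × Int)) (a : Int) (n : Nat) : List (Option Int) :=
  (List.range n).map (fun k : Nat => pvLookup E (a + (k : Int)))

theorem pvApplyEv_replicate (n : Nat) (E : List (Int × Int))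
    (hp : E.Pairwise (fun a b => a.1 < b.1)) (h0 : ∀ e ∈ E, 0 ≤ e.1) :
    pvApplyEv (List.replicate n (none : Option Int)) E = pvSparse E 0 n := by
  apply List.ext_getElem
  · rw [pvApplyEv_length]; simp [pvSparse]
  · intro i hi hi'
    have hin : i < n := by rw [pvApplyEv_length] at hi; simpa using hi
    have h1 := pvApplyEv_getElem E (List.replicate n none) i (by simpa) hp h0
    refine Eq.trans h1 ?_
    have h2 : ∀ (h : i < (pvSparse E 0 n).length),
        (pvSparse E 0 n)[i]'h = pvLookup E (0 + (i : Int)) := by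
      intro h
      unfold pvSparse at h ⊢
      rw [List.getElem_map, List.getElem_range]
    rw [h2 hi']
    rw [List.getElem_replicate, show (0 : Int) + (i : Int) = (i : Int) by omega]
    cases pvLookup E (i : Int) <;> rfl

-- ===== the flagged fold and the main-loop relation =====

theorem pvFoldA_flag (ag ah : String) (code_end block_size search_range : Int)
    (blocks : PySem.Dict String (List Int)) :
    ∀ (l : List Int) (sm : List (Option Int)) (c : Int),
    l.foldl (pvStepA ag ah code_end block_size search_range blocks) (sm, c, true)
      = (sm, c, true) := by
  intro l
  induction l with
  | nil => intro sm c; rfl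
  | cons p t ih =>
    intro sm c
    rw [List.foldl_cons]
    show t.foldl _ (pvStepA ag ah code_end block_size search_range blocks (sm, c, true) p) = _
    rw [show pvStepA ag ah code_end block_size search_range blocks (sm, c, true) p
        = (sm, c, true) from by rw [pvStepA]; rfl]
    exact ih sm c

/-- A's non-fast branch, folded into the named selection option. -/
theorem pvStepA_nonfast (sm : List (Option Int)) (shift ag_pos code_end block_size
    search_range : Int) (cands : List Int) :
    (match (cands.foldl (pvScanA (ag_pos + shift)) (none, search_range + 1)).1 with
     | some best =>
         if (cands.foldl (pvScanA (ag_pos + shift)) (none, search_range + 1)).2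
             ≤ search_range then
           ((pvWriteA code_end block_size (best - ag_pos) ag_pos sm, best - ag_pos, false) :
             List (Option Int) × Int × Bool)
         else (sm, shift, false)
     | none => (sm, shift, false))
    = (match pvSelOpt cands (ag_pos + shift) search_range with
       | some b => (pvWriteA code_end block_size (b - ag_pos) ag_pos sm, b - ag_pos, false)
       | none => (sm, shift, false)) := by
  unfold pvSelOpt
  cases h1 : (cands.foldl (pvScanA (ag_pos + shift)) (none, search_range + 1)).1 with
  | none => rfl
  | some b =>
    by_cases h2 : (cands.foldl (pvScanA (ag_pos + shift)) (none, search_range + 1)).2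
        ≤ search_range
    · simp [h2]
    · simp [h2]

/-- B's `match_shift` in the non-fast case is the mapped selection option. -/
theorem pvMatchB_nonfast (ag ah : String) (code_end block_size search_range : Int)
    (idx : PySem.Dict String (List Int)) (pos shift : Int)
    (hfast : ¬ (0 ≤ pos + shift ∧ pos + shift < code_end ∧
      pos + shift + block_size ≤ PySem.Str.len ah ∧
      PySem.Str.slice ah (some (pos + shift)) (some (pos + shift + block_size))
        = PySem.Str.slice ag (some pos) (some (pos + block_size)))) :
    pvMatchB ag ah code_end block_size search_range idx pos shift
      = (if idx.getD (PySem.Str.slice ag (some pos) (some (pos + block_size))) [] = []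
         then none
         else if |pvPick (idx.getD (PySem.Str.slice ag (some pos) (some (pos + block_size))) [])
             (pos + shift) - (pos + shift)| ≤ search_range
           then some (pvPick (idx.getD
             (PySem.Str.slice ag (some pos) (some (pos + block_size))) []) (pos + shift) - pos)
           else none) := by
  unfold pvMatchB
  rw [if_neg hfast]
  set cands := idx.getD (PySem.Str.slice ag (some pos) (some (pos + block_size))) [] with hc
  by_cases hnil : cands = []
  · rw [if_pos hnil, if_pos hnil]
  · rw [if_neg hnil, if_neg hnil]
    show (if |pvPick cands (pos + shift) - (pos + shift)| ≤ search_range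
        then some (pvPick cands (pos + shift) - pos) else none) = _
    by_cases hd : |pvPick cands (pos + shift) - (pos + shift)| ≤ search_range
    · simp [hd]
    · simp [hd]

/-- The main-loop relation: A's array-mutating fold equals B's event list applied. -/
theorem pvLoop_rel (ag ah : String) (code_end block_size search_range : Int) :
    ∀ (l : List Int), (∀ p ∈ l, 0 ≤ p) → ∀ (sm : List (Option Int)) (shift : Int),
    (l.foldl (pvStepA ag ah code_end block_size search_range (pvBlocksA ah code_end block_size))
        (sm, shift, false)).1
      = pvApplyEv sm (pvLoopB ag ah code_end block_size search_range
          (pvIndexB ah code_end block_size) l shift) := by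
  intro l
  induction l with
  | nil => intro _ sm shift; rfl
  | cons pos rest ih =>
    intro h0 sm shift
    have hpos : (0 : Int) ≤ pos := h0 pos List.mem_cons_self
    have h0' : ∀ p ∈ rest, (0 : Int) ≤ p := fun p hp => h0 p (List.mem_cons_of_mem _ hp)
    rw [List.foldl_cons, pvLoopB]
    by_cases hbrk : PySem.Str.len ag < pos + block_size
    · rw [if_pos hbrk]
      rw [show pvStepA ag ah code_end block_size search_range
          (pvBlocksA ah code_end block_size) (sm, shift, false) pos = (sm, shift, true) from by
        unfold pvStepA
        rw [if_neg (by simp), if_pos hbrk]]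
      rw [pvFoldA_flag]
      rfl
    · rw [if_neg hbrk]
      by_cases hfast : 0 ≤ pos + shift ∧ pos + shift < code_end ∧
          pos + shift + block_size ≤ PySem.Str.len ah ∧
          PySem.Str.slice ah (some (pos + shift)) (some (pos + shift + block_size))
            = PySem.Str.slice ag (some pos) (some (pos + block_size))
      · rw [show pvStepA ag ah code_end block_size search_range
            (pvBlocksA ah code_end block_size) (sm, shift, false) pos
            = (pvWriteA code_end block_size shift pos sm, shift, false) from by
          unfold pvStepA
          rw [if_neg (by simp), if_neg hbrk, if_pos hfast]]
        rw [show pvMatchB ag ah code_end block_size search_range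
            (pvIndexB ah code_end block_size) pos shift = some shift from by
          unfold pvMatchB
          rw [if_pos hfast]]
        rw [ih h0', pvApplyEv_append, pvWrite_apply]
      · set blk := PySem.Str.slice ag (some pos) (some (pos + block_size)) with hblk
        set cands := pvCand ah code_end block_size blk with hcands
        have hA : (pvBlocksA ah code_end block_size).getD blk [] = cands := pvBlocksA_cand ..
        have hB : (pvIndexB ah code_end block_size).getD blk [] = cands := pvIndexB_cand ..
        have hsorted : cands.Pairwise (· < ·) := pvCand_sorted ..
        have hstep : pvStepA ag ah code_end block_size search_range
            (pvBlocksA ah code_end block_size) (sm, shift, false) pos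
            = (match pvSelOpt cands (pos + shift) search_range with
               | some b => (pvWriteA code_end block_size (b - pos) pos sm, b - pos, false)
               | none => (sm, shift, false)) := by
          unfold pvStepA
          rw [if_neg (by simp), if_neg hbrk, if_neg hfast]
          show (match (((pvBlocksA ah code_end block_size).getD blk []).foldl
              (pvScanA (pos + shift)) (none, search_range + 1)).1 with
            | some best =>
                if (((pvBlocksA ah code_end block_size).getD blk []).foldl
                    (pvScanA (pos + shift)) (none, search_range + 1)).2 ≤ search_range then
                  (pvWriteA code_end block_size (best - pos) pos sm, best - pos, false)
                else (sm, shift, false)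
            | none => (sm, shift, false)) = _
          rw [hA]
          exact pvStepA_nonfast sm shift pos code_end block_size search_range cands
        have hmatch : pvMatchB ag ah code_end block_size search_range
            (pvIndexB ah code_end block_size) pos shift
            = (pvSelOpt cands (pos + shift) search_range).map (fun b => b - pos) := by
          rw [pvMatchB_nonfast ag ah code_end block_size search_range _ pos shift hfast]
          rw [show (pvIndexB ah code_end block_size).getD
              (PySem.Str.slice ag (some pos) (some (pos + block_size))) [] = cands from hB]
          rw [pvSelect_eq cands (pos + shift) search_range hsorted]
          by_cases hnil : cands = []
          · rw [if_pos hnil, if_pos hnil]; rfl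
          · rw [if_neg hnil, if_neg hnil]
            by_cases hd : |pvPick cands (pos + shift) - (pos + shift)| ≤ search_range
            · rw [if_pos hd, if_pos hd]; rfl
            · rw [if_neg hd, if_neg hd]; rfl
        rw [hstep, hmatch]
        cases hsel : pvSelOpt cands (pos + shift) search_range with
        | none =>
          rw [ih h0']
          rfl
        | some b =>
          show (rest.foldl _ (pvWriteA code_end block_size (b - pos) pos sm, b - pos, false)).1
            = pvApplyEv sm (pvEventsB code_end block_size pos (b - pos) ++ _)
          rw [ih h0', pvApplyEv_append, pvWrite_apply]

-- ===== invariants of the event list =====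

theorem pvEventsB_spec (code_end block_size pos s : Int) :
    (pvEventsB code_end block_size pos s).Pairwise (fun a b => a.1 < b.1) ∧
    ∀ e ∈ pvEventsB code_end block_size pos s,
      pos ≤ e.1 ∧ e.1 ≤ pos + 1 ∧ e.1 < code_end := by
  have h3 : min 2 block_size ≤ 0 ∨ min 2 block_size = 1 ∨ min 2 block_size = 2 := by omega
  rcases h3 with h | h | h
  · have heq : pvEventsB code_end block_size pos s = [] := by
      unfold pvEventsB
      rw [PySem.List.pyRange_one_eq_nil (by omega)]
      rfl
    rw [heq]
    exact ⟨List.Pairwise.nil, by simp⟩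
  · have hr : PySem.List.pyRange 0 (min 2 block_size) 1 = [0] := by
      rw [h]; decide
    by_cases h0 : pos + 0 < code_end
    · have heq : pvEventsB code_end block_size pos s = [(pos, s)] := by
        unfold pvEventsB; rw [hr]
        simp only [List.foldl_cons, List.foldl_nil, List.nil_append, add_zero]
        rw [if_pos (show pos < code_end by omega)]
      rw [heq]
      refine ⟨List.pairwise_singleton _ _, ?_⟩
      intro e he; simp at he; subst he; refine ⟨by omega, by omega, by omega⟩
    · have heq : pvEventsB code_end block_size pos s = [] := by
        unfold pvEventsB; rw [hr]
        simp only [List.foldl_cons, List.foldl_nil, List.nil_append, add_zero]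
        rw [if_neg (show ¬ pos < code_end by omega)]
      rw [heq]
      exact ⟨List.Pairwise.nil, by simp⟩
  · have hr : PySem.List.pyRange 0 (min 2 block_size) 1 = [0, 1] := by
      rw [h]; decide
    by_cases h0 : pos + 0 < code_end
    · by_cases h1 : pos + 1 < code_end
      · have heq : pvEventsB code_end block_size pos s = [(pos, s), (pos + 1, s)] := by
          unfold pvEventsB; rw [hr]
          simp only [List.foldl_cons, List.foldl_nil, List.nil_append, add_zero]
          rw [if_pos h1, if_pos (show pos < code_end by omega)]
          rfl
        rw [heq]
        constructor
        · refine List.pairwise_cons.2 ⟨?_, List.pairwise_singleton _ _⟩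
          intro b hb; simp at hb; subst hb; simp
        · intro e he
          rcases List.mem_cons.1 he with rfl | he'
          · refine ⟨by omega, by omega, by omega⟩
          · rcases List.mem_singleton.1 he' with rfl
            refine ⟨by omega, by omega, by simpa using h1⟩
      · have heq : pvEventsB code_end block_size pos s = [(pos, s)] := by
          unfold pvEventsB; rw [hr]
          simp only [List.foldl_cons, List.foldl_nil, List.nil_append, add_zero]
          rw [if_neg h1, if_pos (show pos < code_end by omega)]
        rw [heq]
        refine ⟨List.pairwise_singleton _ _, ?_⟩
        intro e he; simp at he; subst he; refine ⟨by omega, by omega, by omega⟩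
    · by_cases h1 : pos + 1 < code_end
      · exact absurd h1 (by omega)
      · have heq : pvEventsB code_end block_size pos s = [] := by
          unfold pvEventsB; rw [hr]
          simp only [List.foldl_cons, List.foldl_nil, List.nil_append, add_zero]
          rw [if_neg h1, if_neg (show ¬ pos < code_end by omega)]
        rw [heq]
        exact ⟨List.Pairwise.nil, by simp⟩

theorem pvLoopB_spec (ag ah : String) (code_end block_size search_range : Int)
    (idx : PySem.Dict String (List Int)) :
    ∀ (l : List Int), l.Pairwise (fun a b => a + 2 ≤ b) → (∀ p ∈ l, 0 ≤ p) → ∀ (shift : Int),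
    (pvLoopB ag ah code_end block_size search_range idx l shift).Pairwise
        (fun a b => a.1 < b.1) ∧
    ∀ e ∈ pvLoopB ag ah code_end block_size search_range idx l shift,
      0 ≤ e.1 ∧ e.1 < code_end ∧ ∃ p ∈ l, p ≤ e.1 := by
  intro l
  induction l with
  | nil => intro _ _ shift; rw [pvLoopB]; exact ⟨List.Pairwise.nil, by simp⟩
  | cons pos rest ih =>
    intro hp h0 shift
    have hpos : (0 : Int) ≤ pos := h0 pos List.mem_cons_self
    have hrest : ∀ b ∈ rest, pos + 2 ≤ b := (List.pairwise_cons.1 hp).1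
    have ihr := ih (List.Pairwise.of_cons hp) (fun p hp' => h0 p (List.mem_cons_of_mem _ hp'))
    rw [pvLoopB]
    by_cases hbrk : PySem.Str.len ag < pos + block_size
    · rw [if_pos hbrk]; exact ⟨List.Pairwise.nil, by simp⟩
    · rw [if_neg hbrk]
      cases hm : pvMatchB ag ah code_end block_size search_range idx pos shift with
      | none =>
        obtain ⟨hpw, hmem⟩ := ihr shift
        refine ⟨hpw, fun e he => ?_⟩
        obtain ⟨h1, h2, p, hpmem, hple⟩ := hmem e he
        exact ⟨h1, h2, p, List.mem_cons_of_mem _ hpmem, hple⟩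
      | some s =>
        obtain ⟨hepw, hemem⟩ := pvEventsB_spec code_end block_size pos s
        obtain ⟨hpw, hmem⟩ := ihr s
        constructor
        · rw [List.pairwise_append]
          refine ⟨hepw, hpw, fun e1 he1 e2 he2 => ?_⟩
          obtain ⟨_, he1b, _⟩ := hemem e1 he1
          obtain ⟨_, _, p, hpmem, hple⟩ := hmem e2 he2
          have := hrest p hpmem
          omega
        · intro e he
          rcases List.mem_append.1 he with he | he
          · obtain ⟨ha, _, hc⟩ := hemem e he
            exact ⟨by omega, hc, pos, List.mem_cons_self, ha⟩
          · obtain ⟨h1, h2, p, hpmem, hple⟩ := hmem e he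
            exact ⟨h1, h2, p, List.mem_cons_of_mem _ hpmem, hple⟩

-- ===== the emission pass vs forward fill =====

/-- Forward fill: the common meaning of A's interpolation pass and B's emission pass. -/
def pvFill : List (Option Int) → Option Int → List (Option Int)
  | [], _ => []
  | some v :: t, _ => some v :: pvFill t (some v)
  | none :: t, last => last :: pvFill t last

theorem pvConsume_skip (i : Int) (E : List (Int × Int)) (last : Option Int)
    (h : ∀ e ∈ E, i < e.1) : pvConsumeB i E last = (last, E) := by
  cases E with
  | nil => rfl
  | cons e t =>
    obtain ⟨p, s⟩ := e
    have := h (p, s) List.mem_cons_self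
    rw [pvConsumeB, if_neg (by simp at this ⊢; omega)]

theorem pvSparse_succ (E : List (Int × Int)) (a : Int) (n : Nat) :
    pvSparse E a (n + 1) = pvLookup E a :: pvSparse E (a + 1) n := by
  unfold pvSparse
  rw [List.range_succ_eq_map]
  rw [List.map_cons, List.map_map]
  congr 1
  · rw [show a + ((0 : Nat) : Int) = a by omega]
  · apply List.map_congr_left
    intro k _
    show pvLookup E (a + ((k + 1 : Nat) : Int)) = pvLookup E (a + 1 + (k : Nat))
    congr 1
    push_cast
    omega

theorem pvSparse_congr (E F : List (Int × Int)) (a : Int) (n : Nat)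
    (h : ∀ (i : Int), a ≤ i → pvLookup E i = pvLookup F i) :
    pvSparse E a n = pvSparse F a n := by
  unfold pvSparse
  apply List.map_congr_left
  intro k _
  exact h _ (by omega)

theorem pvEmit_go (n : Nat) : ∀ (a : Int) (E : List (Int × Int)) (out : List (Option Int))
    (last : Option Int), E.Pairwise (fun x y => x.1 < y.1) → (∀ e ∈ E, a ≤ e.1) →
    ((PySem.List.pyRange a (a + n) 1).foldl
      (fun (st : List (Option Int) × Option Int × List (Int × Int)) i =>
        let c := pvConsumeB i st.2.2 st.2.1
        (st.1 ++ [c.1], c.1, c.2))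
      (out, last, E)).1 = out ++ pvFill (pvSparse E a n) last := by
  induction n with
  | zero =>
    intro a E out last _ _
    rw [show a + ((0 : Nat) : Int) = a by omega, PySem.List.pyRange_one_eq_nil le_rfl]
    simp [pvSparse, pvFill]
  | succ k ih =>
    intro a E out last hp hge
    have hcons : PySem.List.pyRange a (a + ((k + 1 : Nat) : Int)) 1
        = a :: PySem.List.pyRange (a + 1) ((a + 1) + ((k : Nat) : Int)) 1 := by
      rw [PySem.List.pyRange_one_cons (by push_cast; omega)]
      congr 2
      push_cast; omega
    rw [hcons, List.foldl_cons, pvSparse_succ]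
    cases E with
    | nil =>
      show (((PySem.List.pyRange (a+1) ((a+1) + ((k:Nat):Int)) 1).foldl _
        (out ++ [(pvConsumeB a [] last).1], (pvConsumeB a [] last).1,
          (pvConsumeB a [] last).2))).1 = _
      rw [show pvConsumeB a ([] : List (Int × Int)) last = (last, []) from rfl]
      rw [ih (a+1) [] (out ++ [last]) last List.Pairwise.nil (by simp)]
      rw [show pvLookup [] a = none from rfl]
      rw [show pvFill (none :: pvSparse [] (a+1) k) last
          = last :: pvFill (pvSparse [] (a+1) k) last from rfl]
      simp
    | cons e t =>
      obtain ⟨p, s⟩ := e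
      have hap : a ≤ p := hge (p, s) List.mem_cons_self
      have htgt : ∀ x ∈ t, p < x.1 := fun x hx => (List.pairwise_cons.1 hp).1 x hx
      by_cases hpa : p = a
      · have hcons2 : pvConsumeB a ((p, s) :: t) last = (some s, t) := by
          rw [pvConsumeB, if_pos hpa]
          exact pvConsume_skip a t (some s) (fun x hx => by have := htgt x hx; omega)
        show (((PySem.List.pyRange (a+1) ((a+1) + ((k:Nat):Int)) 1).foldl _
          (out ++ [(pvConsumeB a ((p,s)::t) last).1], (pvConsumeB a ((p,s)::t) last).1,
            (pvConsumeB a ((p,s)::t) last).2))).1 = _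
        rw [hcons2]
        rw [ih (a+1) t (out ++ [some s]) (some s) (List.Pairwise.of_cons hp)
          (fun x hx => by have := htgt x hx; omega)]
        rw [show pvLookup ((p, s) :: t) a = some s from by rw [pvLookup, if_pos hpa]]
        rw [show pvFill (some s :: pvSparse ((p,s)::t) (a+1) k) last
            = some s :: pvFill (pvSparse ((p,s)::t) (a+1) k) (some s) from rfl]
        rw [pvSparse_congr ((p,s)::t) t (a+1) k (fun i hi => by
          rw [pvLookup, if_neg (by omega)])]
        simp
      · have hcons2 : pvConsumeB a ((p, s) :: t) last = (last, (p, s) :: t) := by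
          rw [pvConsumeB, if_neg hpa]
        show (((PySem.List.pyRange (a+1) ((a+1) + ((k:Nat):Int)) 1).foldl _
          (out ++ [(pvConsumeB a ((p,s)::t) last).1], (pvConsumeB a ((p,s)::t) last).1,
            (pvConsumeB a ((p,s)::t) last).2))).1 = _
        rw [hcons2]
        rw [ih (a+1) ((p,s)::t) (out ++ [last]) last hp (by
          intro x hx
          rcases List.mem_cons.1 hx with rfl | hx'
          · simp; omega
          · have := htgt x hx'; omega)]
        rw [show pvLookup ((p, s) :: t) a = none from by
          rw [pvLookup, if_neg hpa]
          exact pvLookup_none_of_lt a t (fun x hx => by have := htgt x hx; omega)]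
        rw [show pvFill (none :: pvSparse ((p,s)::t) (a+1) k) last
            = last :: pvFill (pvSparse ((p,s)::t) (a+1) k) last from rfl]
        simp

theorem pvEmitB_eq_fill (code_end : Int) (E : List (Int × Int))
    (hp : E.Pairwise (fun x y => x.1 < y.1)) (h0 : ∀ e ∈ E, 0 ≤ e.1) :
    pvEmitB code_end E = pvFill (pvSparse E 0 code_end.toNat) none := by
  unfold pvEmitB
  by_cases hce : 0 ≤ code_end
  · have hgo := pvEmit_go code_end.toNat 0 E [] none hp h0
    rw [show (0 : Int) + ((code_end.toNat : Nat) : Int) = code_end by omega] at hgo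
    rw [hgo]
    simp
  · rw [PySem.List.pyRange_one_eq_nil (by omega)]
    rw [show code_end.toNat = 0 by omega]
    simp [pvSparse, pvFill]

-- ===== A's interpolation pass vs forward fill =====

theorem pvInterp_go : ∀ (n : Nat) (a : Int) (sm : List (Option Int)) (last : Option Int),
    0 ≤ a → a.toNat + n = sm.length →
    ((PySem.List.pyRange a (a + n) 1).foldl
      (fun (st : List (Option Int) × Option Int) i =>
        match PySem.List.pyGetD st.1 i none with
        | some v => (st.1, some v)
        | none =>
          match st.2 with
          | some lv => (PySem.List.pySetD st.1 i (some lv), some lv)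
          | none => st) (sm, last)).1
      = sm.take a.toNat ++ pvFill (sm.drop a.toNat) last := by
  intro n
  induction n with
  | zero =>
    intro a sm last ha hlen
    rw [show a + ((0 : Nat) : Int) = a by simp, PySem.List.pyRange_one_eq_nil le_rfl]
    rw [List.take_of_length_le (by omega), List.drop_of_length_le (by omega)]
    simp [pvFill]
  | succ k ih =>
    intro a sm last ha hlen
    have hidx : a.toNat < sm.length := by omega
    have hcons : PySem.List.pyRange a (a + ((k + 1 : Nat) : Int)) 1
        = a :: PySem.List.pyRange (a + 1) ((a + 1) + ((k : Nat) : Int)) 1 := by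
      rw [PySem.List.pyRange_one_cons (by push_cast; omega)]
      congr 2
      push_cast; omega
    have hget : PySem.List.pyGetD sm a none = sm[a.toNat] :=
      PySem.List.pyGetD_eq_getElem sm none ha (by omega)
    have hsucc : (a + 1).toNat = a.toNat + 1 := by omega
    have hdropc : sm.drop a.toNat = sm[a.toNat] :: sm.drop (a.toNat + 1) :=
      List.drop_eq_getElem_cons hidx
    rw [hcons, List.foldl_cons]
    cases hv : sm[a.toNat] with
    | some v =>
      have hstep : (match PySem.List.pyGetD sm a none with
          | some v => (sm, some v)
          | none =>
            match last with
            | some lv => (PySem.List.pySetD sm a (some lv), some lv)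
            | none => (sm, last)) = (sm, some v) := by rw [hget, hv]
      rw [hv] at hdropc
      rw [hstep, ih (a + 1) sm (some v) (by omega) (by omega), hsucc]
      rw [List.take_add_one, List.getElem?_eq_getElem hidx, hv, hdropc]
      simp [pvFill]
    | none =>
      rw [hv] at hdropc
      cases last with
      | some lv =>
        have hstep : (match PySem.List.pyGetD sm a none with
            | some v => (sm, some v)
            | none =>
              match (some lv : Option Int) with
              | some lv => (PySem.List.pySetD sm a (some lv), some lv)
              | none => (sm, some lv)) = (sm.set a.toNat (some lv), some lv) := by
          rw [hget, hv]
          show (PySem.List.pySetD sm a (some lv), some lv) = _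
          rw [PySem.List.pySetD_of_nonneg _ _ ha]
        rw [hstep, ih (a + 1) (sm.set a.toNat (some lv)) (some lv) (by omega)
          (by rw [List.length_set]; omega), hsucc]
        rw [List.take_add_one, List.getElem?_set_self hidx,
          List.take_set_of_le (le_refl a.toNat), List.drop_set_of_lt (by omega), hdropc]
        simp [pvFill]
      | none =>
        have hstep : (match PySem.List.pyGetD sm a none with
            | some v => (sm, some v)
            | none =>
              match (none : Option Int) with
              | some lv => (PySem.List.pySetD sm a (some lv), some lv)
              | none => (sm, (none : Option Int))) = (sm, none) := by rw [hget, hv]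
        rw [hstep, ih (a + 1) sm none (by omega) (by omega), hsucc]
        rw [List.take_add_one, List.getElem?_eq_getElem hidx, hv, hdropc]
        simp [pvFill]

theorem pvInterp_eq_fill (code_end : Int) (sm : List (Option Int))
    (hlen : sm.length = code_end.toNat) : pvInterpA code_end sm = pvFill sm none := by
  unfold pvInterpA
  by_cases hce : 0 ≤ code_end
  · have h0 : code_end = 0 + ((code_end.toNat : Nat) : Int) := by omega
    rw [h0]
    rw [pvInterp_go code_end.toNat 0 sm none le_rfl (by simpa using hlen.symm)]
    simp
  · rw [PySem.List.pyRange_one_eq_nil (by omega)]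
    have : sm = [] := by
      have : sm.length = 0 := by omega
      exact List.eq_nil_of_length_eq_zero this
    rw [this]
    simp [pvFill]

-- ===== VERDICT (by name: the statement is the Claim_ definition above) =====
theorem build_shift_map_spec : Claim_equal_build_shift_map := by
  intro ag ah code_end block_size search_range _
  show pvInterpA code_end
      ((PySem.List.pyRange 0 code_end 2).foldl
        (pvStepA ag ah code_end block_size search_range (pvBlocksA ah code_end block_size))
        (List.replicate code_end.toNat none, 0, false)).1
    = pvEmitB code_end
      (pvLoopB ag ah code_end block_size search_range (pvIndexB ah code_end block_size)
        (PySem.List.pyRange 0 code_end 2) 0)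
  have hmem0 : ∀ p ∈ PySem.List.pyRange 0 code_end 2, (0 : Int) ≤ p := by
    intro p hp
    exact ((PySem.List.mem_pyRange_iff_of_pos (by omega) p).1 hp).1
  set E := pvLoopB ag ah code_end block_size search_range (pvIndexB ah code_end block_size)
    (PySem.List.pyRange 0 code_end 2) 0 with hE
  obtain ⟨hEpw, hEmem⟩ := pvLoopB_spec ag ah code_end block_size search_range
    (pvIndexB ah code_end block_size) (PySem.List.pyRange 0 code_end 2)
    (pvRange2_spaced code_end) hmem0 0
  have hE0 : ∀ e ∈ E, (0 : Int) ≤ e.1 := fun e he => (hEmem e he).1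
  rw [pvLoop_rel ag ah code_end block_size search_range _ hmem0]
  rw [pvInterp_eq_fill _ _ (by rw [← hE, pvApplyEv_length]; simp)]
  rw [← hE, pvApplyEv_replicate _ _ hEpw hE0]
  rw [pvEmitB_eq_fill _ _ hEpw hE0]
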